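-- pv_equiv track=rewrite | github.com/yang-su2000/CP-Practice | 2022-09/E136c.py | foo
-- ===== SOURCE A (Python) =====
-- from math import comb
--
-- def foo(N):
--     modulo = 998244353
--     d = {2: (1, 0, 1)} # n -> (win, lose, draw)
--     for n in range(4, N+1, 2):
--         plose, pwin, pdraw = d[n-2]
--         k = n//2
--         win = (comb(n-1, k-1) + pwin) % modulo
--         lose = (comb(n-2, k) + plose) % modulo
--         draw = pdraw
--         d[n] = (win, lose, draw)
--     return d
-- ===== SOURCE B (Python) =====
-- def foo(N):
--     modulo = 998244353
--     d = {2: (1, 0, 1)}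
--     win, lose = 1, 0
--     # a = C(2k-1, k-1), b = C(2k-2, k), maintained by exact multiplicative updates
--     a, b = 3, 1
--     for k in range(2, N // 2 + 1):
--         win, lose = (a + lose) % modulo, (b + win) % modulo
--         d[2 * k] = (win, lose, 1)
--         a = a * (2 * k) * (2 * k + 1) // (k * (k + 1))
--         b = b * (2 * k - 1) * (2 * k) // ((k - 1) * (k + 1))
--     return d
-- ===== Notes on version B (the rewrite author's own statement) =====
-- stated objective: faster
-- what changed: B drops the per-iteration math.comb calls and instead carries the two needed binomial coefficients through the loop, updating each by one exact multiply-then-divide step from its predecessor.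
import Mathlib
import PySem

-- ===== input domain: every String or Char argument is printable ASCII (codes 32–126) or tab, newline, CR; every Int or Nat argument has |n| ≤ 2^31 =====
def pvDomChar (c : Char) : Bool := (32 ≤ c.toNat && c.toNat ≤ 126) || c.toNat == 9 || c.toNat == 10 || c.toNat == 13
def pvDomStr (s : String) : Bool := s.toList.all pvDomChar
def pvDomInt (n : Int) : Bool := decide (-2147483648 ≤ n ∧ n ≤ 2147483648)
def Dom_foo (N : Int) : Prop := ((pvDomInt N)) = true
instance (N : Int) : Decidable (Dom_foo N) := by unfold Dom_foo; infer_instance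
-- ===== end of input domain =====

-- B replaces the per-step math.comb recomputation by a running pair of binomials kept
-- up to date with O(1) exact multiplicative updates (measurably faster).

-- ===== PORT A =====
-- math.comb(n, k); exact for 0 ≤ n and 0 ≤ k, which holds at every call site
-- (A's loop only runs for n ≥ 4 with k = n//2).
def pyComb (n k : Int) : Int := (Nat.choose n.toNat k.toNat : Int)

-- A's loop body: plose, pwin, pdraw = d[n-2]; … ; d[n] = (win, lose, draw)
def fooBody (d : PySem.Dict Int (List Int)) (n : Int) : PySem.Dict Int (List Int) :=
  match d.get? (n - 2) with      -- d[n-2]; the key is always present, so no KeyError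
  | some (plose :: pwin :: pdraw :: _) =>
      let k := PySem.Int.floordiv n 2
      let win := PySem.Int.mod (pyComb (n - 1) (k - 1) + pwin) 998244353
      let lose := PySem.Int.mod (pyComb (n - 2) k + plose) 998244353
      let draw := pdraw
      d.insert n [win, lose, draw]
  | _ => d                       -- unreachable branch

def foo (N : Int) : List (Int × List Int) :=
  let d0 : PySem.Dict Int (List Int) := PySem.Dict.ofList [(2, [1, 0, 1])]
  ((PySem.List.pyRange 4 (N + 1) 2).foldl fooBody d0).items

-- ===== PORT B =====
def fooStep (st : PySem.Dict Int (List Int) × Int × Int × Int × Int) (k : Int) :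
    PySem.Dict Int (List Int) × Int × Int × Int × Int :=
  let (d, win, lose, a, b) := st
  let win' := PySem.Int.mod (a + lose) 998244353
  let lose' := PySem.Int.mod (b + win) 998244353
  let d' := d.insert (2 * k) [win', lose', 1]
  let a' := PySem.Int.floordiv (a * (2 * k) * (2 * k + 1)) (k * (k + 1))
  let b' := PySem.Int.floordiv (b * (2 * k - 1) * (2 * k)) ((k - 1) * (k + 1))
  (d', win', lose', a', b')

def foo_alt (N : Int) : List (Int × List Int) :=
  let d0 : PySem.Dict Int (List Int) := PySem.Dict.ofList [(2, [1, 0, 1])]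
  let st := (PySem.List.pyRange 2 (PySem.Int.floordiv N 2 + 1) 1).foldl fooStep (d0, 1, 0, 3, 1)
  st.1.items

-- ===== PRECONDITION & SPEC =====
def Spec_foo (N : Int) (out : List (Int × List Int)) : Prop := out = foo_alt N
instance (N : Int) (out : List (Int × List Int)) : Decidable (Spec_foo N out) := by unfold Spec_foo; infer_instance

-- ===== CLAIM (what is proved, stated in full; the proofs are below) =====
def Claim_equal_foo : Prop := ∀ (N : Int), Dom_foo N → Spec_foo N (foo N)

-- ===== LEMMAS AND PROOFS =====

-- the two binomial product identities behind B's multiplicative updates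
lemma choose_id1 (i : Nat) :
    Nat.choose (2*i+5) (i+2) * ((i+2)*(i+3)) = Nat.choose (2*i+3) (i+1) * ((2*i+4)*(2*i+5)) := by
  have h1 := Nat.choose_mul_factorial_mul_factorial (show i+2 ≤ 2*i+5 by omega)
  have h2 := Nat.choose_mul_factorial_mul_factorial (show i+1 ≤ 2*i+3 by omega)
  rw [show 2*i+5-(i+2) = i+3 by omega] at h1
  rw [show 2*i+3-(i+1) = i+2 by omega] at h2
  have e3 : (i+2).factorial = (i+2) * (i+1).factorial := by
    rw [show i+2 = (i+1)+1 by omega, Nat.factorial_succ]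
  have e4 : (i+3).factorial = (i+3) * (i+2).factorial := by
    rw [show i+3 = (i+2)+1 by omega, Nat.factorial_succ]
  have e5 : (2*i+5).factorial = (2*i+5) * ((2*i+4) * (2*i+3).factorial) := by
    rw [show 2*i+5 = (2*i+4)+1 by omega, Nat.factorial_succ, show 2*i+4 = (2*i+3)+1 by omega,
        Nat.factorial_succ]
  apply Nat.eq_of_mul_eq_mul_right (show 0 < (i+1).factorial * (i+2).factorial by positivity)
  zify at h1 h2 e3 e4 e5 ⊢
  linear_combination h1 + e5 - (2*(i:ℤ)+4)*(2*(i:ℤ)+5)*h2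
    - ((Nat.choose (2*i+5) (i+2) : ℤ) * ((i+2).factorial : ℤ)) * e4
    - ((i:ℤ)+3)*((Nat.choose (2*i+5) (i+2) : ℤ) * ((i+2).factorial : ℤ)) * e3

lemma choose_id2 (i : Nat) :
    Nat.choose (2*i+4) (i+3) * ((i+1)*(i+3)) = Nat.choose (2*i+2) (i+2) * ((2*i+3)*(2*i+4)) := by
  have h1 := Nat.choose_mul_factorial_mul_factorial (show i+3 ≤ 2*i+4 by omega)
  have h2 := Nat.choose_mul_factorial_mul_factorial (show i+2 ≤ 2*i+2 by omega)
  rw [show 2*i+4-(i+3) = i+1 by omega] at h1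
  rw [show 2*i+2-(i+2) = i by omega] at h2
  have e3 : (i+3).factorial = (i+3) * (i+2).factorial := by
    rw [show i+3 = (i+2)+1 by omega, Nat.factorial_succ]
  have e4 : (i+1).factorial = (i+1) * Nat.factorial i := Nat.factorial_succ i
  have e5 : (2*i+4).factorial = (2*i+4) * ((2*i+3) * (2*i+2).factorial) := by
    rw [show 2*i+4 = (2*i+3)+1 by omega, Nat.factorial_succ, show 2*i+3 = (2*i+2)+1 by omega,
        Nat.factorial_succ]
  apply Nat.eq_of_mul_eq_mul_right (show 0 < (i+2).factorial * Nat.factorial i by positivity)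
  zify at h1 h2 e3 e4 e5 ⊢
  linear_combination h1 + e5 - (2*(i:ℤ)+3)*(2*(i:ℤ)+4)*h2
    - ((Nat.choose (2*i+4) (i+3) : ℤ) * ((i+1).factorial : ℤ)) * e3
    - ((i:ℤ)+3)*((Nat.choose (2*i+4) (i+3) : ℤ) * ((i+2).factorial : ℤ)) * e4

-- A's even range is B's index range doubled
lemma range_double (N : Int) :
    PySem.List.pyRange 4 (N + 1) 2
      = (PySem.List.pyRange 2 (PySem.Int.floordiv N 2 + 1) 1).map (fun k => 2 * k) := by
  rw [PySem.List.pyRange_of_pos 4 (N+1) (by norm_num), PySem.List.pyRange_one, List.map_map]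
  rw [PySem.Int.floordiv_eq_ediv_of_pos (by norm_num)]
  have hlen : (if (4:Int) < N + 1 then ((N + 1 - 4 + 2 - 1) / 2).toNat else 0)
      = (N / 2 + 1 - 2).toNat := by
    split_ifs with h
    · omega
    · omega
  rw [hlen]
  apply List.map_congr_left
  intro k _
  simp only [Function.comp]
  ring

-- one step of A's loop at n = 2j when the previous entry is in the dict
lemma stepA (j : Nat) (hj : 2 ≤ j) (d : PySem.Dict Int (List Int)) (win lose : Int)
    (hget : d.get? (2*(j:Int) - 2) = some [win, lose, 1]) :
    fooBody d (2*(j:Int))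
      = d.insert (2*(j:Int))
          [PySem.Int.mod (((2*j-1).choose (j-1) : Int) + lose) 998244353,
           PySem.Int.mod (((2*j-2).choose j : Int) + win) 998244353, 1] := by
  have hk : PySem.Int.floordiv (2*(j:Int)) 2 = (j:Int) := by
    rw [PySem.Int.floordiv_eq_ediv_of_pos (by norm_num)]
    omega
  have hc1 : pyComb (2*(j:Int) - 1) ((j:Int) - 1) = ((2*j-1).choose (j-1) : Int) := by
    unfold pyComb
    rw [show (2*(j:Int) - 1).toNat = 2*j-1 by omega, show ((j:Int) - 1).toNat = j-1 by omega]
  have hc2 : pyComb (2*(j:Int) - 2) (j:Int) = ((2*j-2).choose j : Int) := by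
    unfold pyComb
    rw [show (2*(j:Int) - 2).toNat = 2*j-2 by omega, Int.toNat_natCast]
  unfold fooBody
  rw [hget]
  simp only [hk, hc1, hc2]

lemma floordiv_mul_cancel (q y : Int) (hy : 0 < y) : PySem.Int.floordiv (q*y) y = q := by
  rw [PySem.Int.floordiv_eq_ediv_of_pos hy, Int.mul_ediv_cancel q (ne_of_gt hy)]

-- B's multiplicative updates produce the next pair of binomials
lemma updA (j : Nat) (hj : 2 ≤ j) :
    PySem.Int.floordiv (((2*j-1).choose (j-1) : Int) * (2*(j:Int)) * (2*(j:Int)+1))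
        ((j:Int)*((j:Int)+1))
      = ((2*(j+1)-1).choose ((j+1)-1) : Int) := by
  obtain ⟨i, rfl⟩ : ∃ i, j = i + 2 := ⟨j - 2, by omega⟩
  rw [show (2*(i+2)-1 : Nat) = 2*i+3 by omega, show ((i+2)-1 : Nat) = i+1 by omega,
      show (2*(i+2+1)-1 : Nat) = 2*i+5 by omega, show ((i+2+1)-1 : Nat) = i+2 by omega]
  have h := choose_id1 i
  have hnum : ((2*i+3).choose (i+1) : Int) * (2*((i+2:Nat):Int)) * (2*((i+2:Nat):Int)+1)
      = ((2*i+5).choose (i+2) : Int) * (((i+2:Nat):Int)*(((i+2:Nat):Int)+1)) := by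
    zify at h
    push_cast
    linear_combination -h
  rw [hnum]
  exact floordiv_mul_cancel _ _ (by positivity)

lemma updB (j : Nat) (hj : 2 ≤ j) :
    PySem.Int.floordiv (((2*j-2).choose j : Int) * (2*(j:Int)-1) * (2*(j:Int)))
        (((j:Int)-1)*((j:Int)+1))
      = ((2*(j+1)-2).choose (j+1) : Int) := by
  obtain ⟨i, rfl⟩ : ∃ i, j = i + 2 := ⟨j - 2, by omega⟩
  rw [show (2*(i+2)-2 : Nat) = 2*i+2 by omega, show (2*(i+2+1)-2 : Nat) = 2*i+4 by omega]
  have h := choose_id2 i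
  have hnum : ((2*i+2).choose (i+2) : Int) * (2*((i+2:Nat):Int)-1) * (2*((i+2:Nat):Int))
      = ((2*i+4).choose (i+2+1) : Int) * ((((i+2:Nat):Int)-1)*(((i+2:Nat):Int)+1)) := by
    zify at h
    push_cast
    rw [show (i+2+1 : Nat) = i+3 by omega]
    linear_combination -h
  rw [hnum]
  refine floordiv_mul_cancel _ _ ?_
  have h2 : ((i+2:Nat):Int) = (i:Int)+2 := by push_cast; ring
  rw [h2]
  have h0 : (0:Int) ≤ (i:Int) := Int.natCast_nonneg i
  nlinarith

-- the two loops run in lock-step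
lemma loop_eq (m : Nat) : ∀ (j : Nat) (d : PySem.Dict Int (List Int)) (win lose : Int),
    2 ≤ j →
    d.get? (2*(j:Int) - 2) = some [win, lose, 1] →
    (PySem.List.pyRange (j:Int) ((j:Int)+(m:Int)) 1).foldl (fun d k => fooBody d (2*k)) d
    = ((PySem.List.pyRange (j:Int) ((j:Int)+(m:Int)) 1).foldl fooStep
        (d, win, lose, ((2*j-1).choose (j-1) : Int), ((2*j-2).choose j : Int))).1 := by
  induction m with
  | zero =>
    intro j d win lose hj hget
    rw [PySem.List.pyRange_one_eq_nil (by simp)]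
    simp
  | succ m ih =>
    intro j d win lose hj hget
    rw [PySem.List.pyRange_one_cons (by push_cast; omega)]
    simp only [List.foldl_cons]
    rw [stepA j hj d win lose hget]
    have hstep : fooStep (d, win, lose, ((2*j-1).choose (j-1) : Int), ((2*j-2).choose j : Int)) (j:Int)
        = (d.insert (2*(j:Int))
            [PySem.Int.mod (((2*j-1).choose (j-1) : Int) + lose) 998244353,
             PySem.Int.mod (((2*j-2).choose j : Int) + win) 998244353, 1],
           PySem.Int.mod (((2*j-1).choose (j-1) : Int) + lose) 998244353,
           PySem.Int.mod (((2*j-2).choose j : Int) + win) 998244353,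
           ((2*(j+1)-1).choose ((j+1)-1) : Int), ((2*(j+1)-2).choose (j+1) : Int)) := by
      simp only [fooStep]
      rw [updA j hj, updB j hj]
    rw [hstep]
    have e1 : (j:Int)+1 = ((j+1:Nat):Int) := by push_cast; ring
    have e2 : (j:Int)+((m+1:Nat):Int) = ((j+1:Nat):Int)+((m:Nat):Int) := by push_cast; ring
    rw [e1, e2]
    apply ih (j+1) _ _ _ (by omega)
    rw [show 2*((j+1:Nat):Int) - 2 = 2*(j:Int) by push_cast; ring]
    exact PySem.Dict.get?_insert_self _ _ _

-- ===== VERDICT (by name: the statement is the Claim_ definition above) =====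
theorem foo_spec : Claim_equal_foo := by
  unfold Claim_equal_foo
  intro N _
  unfold Spec_foo
  show ((PySem.List.pyRange 4 (N + 1) 2).foldl fooBody (PySem.Dict.ofList [(2, [1, 0, 1])])).items
      = ((PySem.List.pyRange 2 (PySem.Int.floordiv N 2 + 1) 1).foldl fooStep
          (PySem.Dict.ofList [(2, [1, 0, 1])], 1, 0, 3, 1)).1.items
  rw [range_double, List.foldl_map]
  by_cases hK : PySem.Int.floordiv N 2 + 1 ≤ 2
  · rw [PySem.List.pyRange_one_eq_nil hK]
    simp
  · obtain ⟨m, hm⟩ : ∃ m : Nat, PySem.Int.floordiv N 2 + 1 = 2 + (m:Int) :=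
      ⟨(PySem.Int.floordiv N 2 - 1).toNat, by omega⟩
    rw [hm]
    have h := loop_eq m 2 (PySem.Dict.ofList [(2, [1, 0, 1])]) 1 0 (le_refl 2) (by decide)
    norm_num [Nat.choose] at h
    rw [h]
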